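-- pv_equiv track=rewrite | github.com/gwon477/TIL | 유형별 문제 풀이/구현/[PCCP 모의고사 #1] 1번 - 외톨이 알파벳.py | solution
-- ===== SOURCE A (Python) =====
-- from collections import defaultdict
--
-- def solution(input_string):
--     answer = ''
--     a = set()
--     graph = defaultdict(list)
--     before = input_string[0]
--     graph[before].append(1)
--     N = len(input_string)
--
--     for i in range(1,N):
--         if input_string[i] == before:
--             graph[input_string[i]].append(1)
--         else:
--             if input_string[i] not in graph:
--                 graph[input_string[i]].append(1)
--             else:
--                 a.add(input_string[i])
--         before = input_string[i]
--
--     if not a: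
--         return 'N'
--
--     sorted_answer = sorted(a)
--     for _ in sorted_answer:
--         answer += _
--
--     return answer
-- ===== SOURCE B (Python) =====
-- from collections import Counter
--
-- def solution(input_string):
--     # compress the string into runs: first char + every char differing from its predecessor
--     heads = [input_string[0]] + [c for p, c in zip(input_string, input_string[1:]) if c != p]
--     counts = Counter(heads)
--     lonely = sorted(c for c in counts if counts[c] >= 2)
--     return ''.join(lonely) if lonely else 'N'
-- ===== Notes on version B (the rewrite author's own statement) =====
-- stated objective: idiomatic
-- what changed: Replaces the before-char state machine with a defaultdict-of-lists and a set by a direct run-compression (zip with the shifted string) followed by a Counter of run heads, collecting letters whose run count is at least 2.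
import Mathlib
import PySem

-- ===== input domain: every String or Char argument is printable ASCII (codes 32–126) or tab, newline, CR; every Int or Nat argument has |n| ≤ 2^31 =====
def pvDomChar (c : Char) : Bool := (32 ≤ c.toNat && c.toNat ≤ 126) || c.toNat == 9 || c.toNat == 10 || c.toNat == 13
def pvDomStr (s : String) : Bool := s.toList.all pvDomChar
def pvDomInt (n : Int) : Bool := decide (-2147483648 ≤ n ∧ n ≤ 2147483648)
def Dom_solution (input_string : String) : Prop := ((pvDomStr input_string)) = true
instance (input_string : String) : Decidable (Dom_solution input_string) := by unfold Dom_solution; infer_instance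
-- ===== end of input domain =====

-- B replaces A's before-char/defaultdict/set state machine by run-compression + a Counter of run heads (idiomatic, same cost).

-- ===== PORT A =====
-- one loop iteration of A: state (graph, a, before), incoming char c
def stepA (st : PySem.Dict Char (List Int) × PySem.Set Char × Char) (c : Char) :
    PySem.Dict Char (List Int) × PySem.Set Char × Char :=
  if c == st.2.2 then (st.1.modify c [] (· ++ [1]), st.2.1, c)
  else if st.1.contains c = false then (st.1.modify c [] (· ++ [1]), st.2.1, c)
  else (st.1, PySem.Set.add st.2.1 c, c)

def solution (input_string : String) : String :=
  let cs := input_string.toList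
  match PySem.List.pyGet? cs 0 with
  | none => ""  -- IndexError on empty input; excluded by Pre_solution
  | some b0 =>
    let graph0 : PySem.Dict Char (List Int) := PySem.Dict.empty.modify b0 [] (· ++ [1])
    let N : Int := PySem.Str.len input_string
    let st := (PySem.List.pyRange 1 N 1).foldl
      (fun st j => stepA st (PySem.List.pyGetD cs j ' ')) (graph0, PySem.Set.empty, b0)
    if st.2.1 = [] then "N"
    else String.mk ((PySem.List.sorted st.2.1 (fun x => x) false).foldl (fun acc c => acc ++ [c]) [])

-- ===== PORT B =====
def solution_alt (input_string : String) : String :=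
  let cs := input_string.toList
  match PySem.List.pyGet? cs 0 with
  | none => ""  -- IndexError on empty input; excluded by Pre_solution
  | some c0 =>
    let heads := c0 :: ((cs.zip (PySem.List.slice cs (some 1) none)).filter (fun pc => pc.2 != pc.1)).map (·.2)
    let counts := PySem.Dict.counter heads
    let lonely := PySem.List.sorted (counts.keys.filter (fun c => (2 : Int) ≤ counts.getD c 0)) (fun x => x) false
    if lonely = [] then "N"
    else String.mk (PySem.Chars.join [] (lonely.map (fun c => [c])))

-- ===== PRECONDITION & SPEC =====
-- Pre_ excludes only the empty string, on which A (and B) raise IndexError at input_string[0].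
def Pre_solution (input_string : String) : Prop := input_string ≠ ""
instance (input_string : String) : Decidable (Pre_solution input_string) := by unfold Pre_solution; infer_instance
def pvWitness_solution : String := "aba"

def Spec_solution (input_string : String) (out : String) : Prop := out = solution_alt input_string
instance (input_string : String) (out : String) : Decidable (Spec_solution input_string out) := by unfold Spec_solution; infer_instance

-- ===== CLAIM (what is proved, stated in full; the proofs are below) =====
def Claim_equal_solution : Prop := ∀ (input_string : String), Dom_solution input_string → Pre_solution input_string → Spec_solution input_string (solution input_string)

-- ===== LEMMAS AND PROOFS =====

-- the run heads after a run of b: first chars of maximal runs in l, given previous char b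
def headsAfter (b : Char) : List Char → List Char
  | [] => []
  | x :: xs => if x = b then headsAfter b xs else x :: headsAfter x xs

theorem zip_filter_eq_headsAfter (l : List Char) (b : Char) :
    (((b :: l).zip l).filter (fun pc => pc.2 != pc.1)).map (·.2) = headsAfter b l := by
  induction l generalizing b with
  | nil => simp [headsAfter]
  | cons x xs ih =>
    simp only [List.zip_cons_cons, List.filter_cons, headsAfter]
    by_cases hx : x = b
    · simp [hx, ih]
    · simp [hx, bne_iff_ne, ih]

theorem foldl_stepA_mem (l : List Char) : ∀ (g : PySem.Dict Char (List Int))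
    (a : PySem.Set Char) (b c : Char), g.contains b = true →
    (c ∈ (l.foldl stepA (g, a, b)).2.1 ↔
      c ∈ a ∨ (g.contains c = true ∧ c ∈ headsAfter b l) ∨ 2 ≤ (headsAfter b l).count c) := by
  induction l with
  | nil => intro g a b c hb; simp [headsAfter]
  | cons x xs ih =>
    intro g a b c hb
    rw [List.foldl_cons]
    by_cases hxb : x = b
    · subst hxb
      have h1 : stepA (g, a, x) x = (g.modify x [] (· ++ [1]), a, x) := by simp [stepA]
      rw [h1, headsAfter, if_pos rfl,
        ih _ _ _ c (by simp [PySem.Dict.contains_modify]),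
        PySem.Dict.contains_modify g x c]
      by_cases hcx : c = x
      · subst hcx; simp [hb]
      · simp [hcx]
    · have hbeq : (x == b) = false := by simp [hxb]
      rw [headsAfter, if_neg hxb]
      by_cases hg : g.contains x = false
      · have h1 : stepA (g, a, b) x = (g.modify x [] (· ++ [1]), a, x) := by
          simp [stepA, hbeq, hg]
        rw [h1, ih _ _ _ c (by simp [PySem.Dict.contains_modify]),
          PySem.Dict.contains_modify g x c, List.count_cons]
        by_cases hcx : c = x
        · subst hcx
          have hmc : 0 < (headsAfter c xs).count c ↔ c ∈ headsAfter c xs :=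
            List.count_pos_iff
          simp only [beq_self_eq_true, Bool.true_or, true_and, hg, List.mem_cons,
            eq_self_iff_true, if_true, Bool.false_eq_true, false_and, false_or]
          constructor
          · rintro (h | h | h)
            · exact Or.inl h
            · right; have := hmc.mpr h; omega
            · right; omega
          · rintro (h | h)
            · exact Or.inl h
            · by_cases hm : c ∈ headsAfter c xs
              · exact Or.inr (Or.inl hm)
              · right; have : (headsAfter c xs).count c = 0 := by
                  rwa [List.count_eq_zero]
                omega
        · have hxc : ¬x = c := fun h => hcx h.symm
          have hne : (c == x) = false := by simp [hcx]
          simp [hne, hcx, hxc]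
      · have hgt : g.contains x = true := by simpa using hg
        have h1 : stepA (g, a, b) x = (g, PySem.Set.add a x, x) := by
          simp [stepA, hbeq, hgt]
        rw [h1, ih _ _ _ c hgt, List.count_cons]
        by_cases hcx : c = x
        · subst hcx
          simp [PySem.Set.mem_add, hgt]
        · have hxc : ¬x = c := fun h => hcx h.symm
          simp [PySem.Set.mem_add, hcx, hxc]

theorem foldl_stepA_nodup (l : List Char) (g : PySem.Dict Char (List Int))
    (a : PySem.Set Char) (b : Char) (ha : a.Nodup) :
    (l.foldl stepA (g, a, b)).2.1.Nodup := by
  induction l generalizing g a b with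
  | nil => exact ha
  | cons x xs ih =>
    simp only [List.foldl_cons, stepA]
    split_ifs <;> exact ih _ _ _ (by first | exact ha | exact PySem.Set.nodup_add _ _ ha)

theorem foldl_append_singleton (l acc : List Char) :
    l.foldl (fun acc c => acc ++ [c]) acc = acc ++ l := by
  induction l generalizing acc with
  | nil => simp
  | cons x xs ih => simp [ih]

theorem solution_eq_alt (input_string : String) (h : input_string ≠ "") :
    solution input_string = solution_alt input_string := by
  obtain ⟨c0, rest, hcs⟩ : ∃ c0 rest, input_string.toList = c0 :: rest := by
    cases hx : input_string.toList with
    | nil => exact absurd (String.toList_inj.mp (by simp [hx])) h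
    | cons y ys => exact ⟨y, ys, rfl⟩
  unfold solution solution_alt
  simp only [hcs, PySem.List.pyGet?_zero_cons]
  -- A's range loop over indices 1..N is the fold of stepA over rest
  have hlen : PySem.Str.len input_string = ((c0 :: rest).length : Int) := by
    simp [hcs]
  rw [hlen, PySem.List.foldl_pyRange_pyGetD' (c0 :: rest) ' ' stepA _ (by norm_num : (0:Int) ≤ 1)]
  simp only [Int.toNat_one, List.drop_one, List.tail_cons]
  -- B's zip/filter comprehension computes the run heads
  rw [PySem.List.slice_from _ (by norm_num : (0:Int) ≤ 1)]
  simp only [Int.toNat_one, List.drop_one, List.tail_cons]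
  rw [zip_filter_eq_headsAfter rest c0]
  set t := headsAfter c0 rest with ht
  set g0 : PySem.Dict Char (List Int) := PySem.Dict.empty.modify c0 [] (· ++ [1]) with hg0
  set aF := (rest.foldl stepA (g0, PySem.Set.empty, c0)).2.1 with haF
  set lonelySrc := (PySem.Dict.counter (c0 :: t)).keys.filter
      (fun c => (2 : Int) ≤ (PySem.Dict.counter (c0 :: t)).getD c 0) with hlonely
  have hg0b : g0.contains c0 = true := by
    simp [hg0, PySem.Dict.contains_modify]
  have hg0c : ∀ c, g0.contains c = (c == c0) := by
    intro c; simp [hg0, PySem.Dict.contains_modify, PySem.Dict.contains_empty]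
  -- same membership on both sides
  have hmem : ∀ c, c ∈ aF ↔ c ∈ lonelySrc := by
    intro c
    have hkc : c ∈ (PySem.Dict.counter (c0 :: t)).keys ↔ c ∈ (c0 :: t) := by
      rw [PySem.Dict.keys_counter]; exact PySem.Set.mem_ofList (c0 :: t) c
    have hcount : (PySem.Dict.counter (c0 :: t)).getD c 0 = ((List.count c (c0 :: t) : Nat) : Int) :=
      PySem.Dict.getD_counter (c0 :: t) c
    have hmc : 0 < t.count c ↔ c ∈ t := @List.count_pos_iff Char _ _ c t
    have hA : c ∈ aF ↔ ((c = c0 ∧ c ∈ t) ∨ 2 ≤ t.count c) := by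
      rw [haF, foldl_stepA_mem rest g0 PySem.Set.empty c0 c hg0b, hg0c c, ← ht]
      simp [beq_iff_eq]
    have hB : c ∈ lonelySrc ↔ 2 ≤ (c0 :: t).count c := by
      rw [hlonely, List.mem_filter]
      constructor
      · rintro ⟨h1, h2⟩
        simp only [hcount, decide_eq_true_eq] at h2
        exact_mod_cast h2
      · intro h2
        refine ⟨hkc.mpr (List.count_pos_iff.mp (by omega)), ?_⟩
        simp only [hcount, decide_eq_true_eq]
        exact_mod_cast h2
    have hcc : (c0 :: t).count c = t.count c + (if c0 = c then 1 else 0) := by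
      simp [List.count_cons]
    rw [hA, hB, hcc]
    by_cases hc : c0 = c
    · rw [if_pos hc]
      subst hc
      constructor
      · rintro (⟨-, hm⟩ | h2)
        · have := hmc.mpr hm; omega
        · omega
      · intro hcnt
        by_cases hm : c0 ∈ t
        · exact Or.inl ⟨rfl, hm⟩
        · have h0 : t.count c0 = 0 := List.count_eq_zero.mpr hm
          right; omega
    · rw [if_neg hc]
      constructor
      · rintro (⟨he, -⟩ | h2)
        · exact absurd he.symm hc
        · omega
      · intro hcnt; right; omega
  -- both are nodup, hence a permutation
  have hnodupA : aF.Nodup := foldl_stepA_nodup rest g0 PySem.Set.empty c0 List.nodup_nil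
  have hnodupB : lonelySrc.Nodup := by
    rw [hlonely]
    refine List.Nodup.filter _ ?_
    rw [PySem.Dict.keys_counter]; exact PySem.Set.nodup_ofList _
  have hperm : aF.Perm lonelySrc :=
    (List.perm_ext_iff_of_nodup hnodupA hnodupB).mpr hmem
  have hsorted : PySem.List.sorted aF (fun x => x) false
      = PySem.List.sorted lonelySrc (fun x => x) false :=
    PySem.List.sorted_eq_sorted_of_perm _ _ _ (fun _ _ h => h) hperm
  by_cases hnil : aF = []
  · have h2 : lonelySrc = [] := ((hnil ▸ hperm).symm).eq_nil
    rw [if_pos hnil, if_pos ((PySem.List.sorted_eq_nil_iff _ _ _).mpr h2)]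
  · have h2 : lonelySrc ≠ [] := fun h => hnil ((h ▸ hperm).eq_nil)
    rw [if_neg hnil, if_neg (fun h => h2 ((PySem.List.sorted_eq_nil_iff _ _ _).mp h)),
      foldl_append_singleton, List.nil_append, hsorted, PySem.Chars.join_nil_singletons]

-- ===== VERDICT (by name: the statement is the Claim_ definition above) =====
theorem solution_spec : Claim_equal_solution := by
  intro s _ hpre
  unfold Spec_solution
  exact solution_eq_alt s hpre
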